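-- pv_equiv track=rewrite | github.com/misc-ap/workspace | tmp/mproj.py | get_fare_stage
-- ===== SOURCE A (Python) =====
-- fare_stages=[0,3,5,7,8]
--
-- def get_fare_stage(src,dest):
--     for src_stage in reversed(fare_stages):
--         if src >= src_stage:
--             break
--     for dest_stage in fare_stages:
--         if dest <= dest_stage:
--             break
--     return src_stage,dest_stage
-- ===== SOURCE B (Python) =====
-- fare_stages=[0,3,5,7,8]
--
-- def _bisect_right(a, x):
--     lo, hi = 0, len(a)
--     while lo < hi:
--         mid = (lo + hi) // 2
--         if x < a[mid]:
--             hi = mid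
--         else:
--             lo = mid + 1
--     return lo
--
-- def _bisect_left(a, x):
--     lo, hi = 0, len(a)
--     while lo < hi:
--         mid = (lo + hi) // 2
--         if a[mid] < x:
--             lo = mid + 1
--         else:
--             hi = mid
--     return lo
--
-- def get_fare_stage(src, dest):
--     i = _bisect_right(fare_stages, src) - 1
--     src_stage = fare_stages[i] if i >= 0 else fare_stages[0]
--     j = _bisect_left(fare_stages, dest)
--     dest_stage = fare_stages[j] if j < len(fare_stages) else fare_stages[-1]
--     return src_stage, dest_stage
-- ===== Notes on version B (the rewrite author's own statement) =====
-- stated objective: alternative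
-- what changed: Replaces A's two linear short-circuit scans over fare_stages with hand-written binary searches (bisect_right for src, bisect_left for dest) plus explicit out-of-range clamps to the first/last stage.
import Mathlib
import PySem

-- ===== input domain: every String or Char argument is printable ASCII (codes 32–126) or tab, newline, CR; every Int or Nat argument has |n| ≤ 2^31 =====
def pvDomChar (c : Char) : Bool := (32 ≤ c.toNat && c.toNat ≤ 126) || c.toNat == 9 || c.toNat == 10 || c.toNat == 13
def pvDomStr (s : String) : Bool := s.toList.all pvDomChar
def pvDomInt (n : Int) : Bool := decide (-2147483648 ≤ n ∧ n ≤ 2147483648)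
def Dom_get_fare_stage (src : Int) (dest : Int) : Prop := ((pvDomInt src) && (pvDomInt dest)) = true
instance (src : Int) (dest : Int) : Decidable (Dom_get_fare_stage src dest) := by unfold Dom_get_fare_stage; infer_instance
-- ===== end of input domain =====

-- B replaces A's two linear short-circuit scans with binary searches over the constant fare stages.
-- ===== PORT A =====
-- A iterates reversed(fare_stages) breaking at the first stage <= src (loop variable keeps the
-- last element if no break), and fare_stages breaking at the first stage >= dest.
def pvScanSrc (src : Int) : List Int → Int
  | [] => 0      -- unreachable: fare_stages is nonempty
  | [x] => x     -- last iteration: loop variable holds x whether or not the break fires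
  | x :: rest => if src ≥ x then x else pvScanSrc src rest

def pvScanDest (dest : Int) : List Int → Int
  | [] => 0
  | [x] => x
  | x :: rest => if dest ≤ x then x else pvScanDest dest rest

def get_fare_stage (src : Int) (dest : Int) : Int × Int :=
  (pvScanSrc src [8, 7, 5, 3, 0], pvScanDest dest [0, 3, 5, 7, 8])

-- ===== PORT B =====
-- hand-written bisect_right loop of Source B (exact: Nat / 2 matches Python // on nonnegative ints)
-- 'fuel' only makes the while-loop structurally total: fuel = a.length ≥ number of iterations,
-- since hi - lo at least halves each step.
def pvBisR (a : List Int) (x : Int) : Nat → Nat → Nat → Nat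
  | 0, lo, _ => lo
  | fuel + 1, lo, hi =>
    if lo < hi then
      let mid := (lo + hi) / 2
      if x < a.getD mid 0 then pvBisR a x fuel lo mid else pvBisR a x fuel (mid + 1) hi
    else lo

-- hand-written bisect_left loop of Source B
def pvBisL (a : List Int) (x : Int) : Nat → Nat → Nat → Nat
  | 0, lo, _ => lo
  | fuel + 1, lo, hi =>
    if lo < hi then
      let mid := (lo + hi) / 2
      if a.getD mid 0 < x then pvBisL a x fuel (mid + 1) hi else pvBisL a x fuel lo mid
    else lo

def pvFareStages : List Int := [0, 3, 5, 7, 8]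

def get_fare_stage_alt (src : Int) (dest : Int) : Int × Int :=
  let i := pvBisR pvFareStages src pvFareStages.length 0 pvFareStages.length
  let src_stage := if i ≥ 1 then pvFareStages.getD (i - 1) 0 else pvFareStages.getD 0 0
  let j := pvBisL pvFareStages dest pvFareStages.length 0 pvFareStages.length
  let dest_stage := if j < pvFareStages.length then pvFareStages.getD j 0
                    else pvFareStages.getD (pvFareStages.length - 1) 0
  (src_stage, dest_stage)

-- ===== PRECONDITION & SPEC =====
def Spec_get_fare_stage (src : Int) (dest : Int) (out : Int × Int) : Prop := out = get_fare_stage_alt src dest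
instance (src : Int) (dest : Int) (out : Int × Int) : Decidable (Spec_get_fare_stage src dest out) := by unfold Spec_get_fare_stage; infer_instance

-- ===== CLAIM (what is proved, stated in full; the proofs are below) =====
def Claim_equal_get_fare_stage : Prop := ∀ (src : Int) (dest : Int), Dom_get_fare_stage src dest → Spec_get_fare_stage src dest (get_fare_stage src dest)

-- ===== LEMMAS AND PROOFS =====
-- closed-form evaluations of the two binary searches on the constant stage list
lemma pvBisR_eval (x : Int) :
    pvBisR pvFareStages x 5 0 5 =
      if x < 5 then (if x < 3 then (if x < 0 then 0 else 1) else 2)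
      else (if x < 7 then 3 else if x < 8 then 4 else 5) := by
  simp only [pvBisR, pvFareStages]
  norm_num
  split_ifs <;> omega

lemma pvBisL_eval (x : Int) :
    pvBisL pvFareStages x 5 0 5 =
      if 5 < x then (if 8 < x then 5 else if 7 < x then 4 else 3)
      else (if 3 < x then 2 else if 0 < x then 1 else 0) := by
  simp only [pvBisL, pvFareStages]
  norm_num

-- closed-form evaluations of A's two short-circuit scans
lemma pvScanSrc_eval (x : Int) :
    pvScanSrc x [8, 7, 5, 3, 0] =
      if x ≥ 8 then 8 else if x ≥ 7 then 7 else if x ≥ 5 then 5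
      else if x ≥ 3 then 3 else 0 := by
  simp [pvScanSrc]

lemma pvScanDest_eval (x : Int) :
    pvScanDest x [0, 3, 5, 7, 8] =
      if x ≤ 0 then 0 else if x ≤ 3 then 3 else if x ≤ 5 then 5
      else if x ≤ 7 then 7 else 8 := by
  simp [pvScanDest]

-- ===== VERDICT (by name: the statement is the Claim_ definition above) =====
theorem get_fare_stage_spec : Claim_equal_get_fare_stage := by
  intro src dest _
  unfold Spec_get_fare_stage get_fare_stage get_fare_stage_alt
  show (pvScanSrc src [8, 7, 5, 3, 0], pvScanDest dest [0, 3, 5, 7, 8]) = _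
  rw [show pvFareStages.length = 5 from rfl]
  rw [pvBisR_eval, pvBisL_eval, pvScanSrc_eval, pvScanDest_eval]
  refine Prod.ext ?_ ?_ <;> simp only [pvFareStages] <;>
    split_ifs <;> simp [List.getD] <;> omega
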